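-- pv_equiv track=rewrite | github.com/Trista1208/accessibility_swiss_healthcare | backup_before_cleanup/data_cleaning_seg.py | categorize_issue
-- ===== SOURCE A (Python) =====
-- def categorize_issue(title):
--     """Categorize an issue based on its title and return detailed categorization."""
--     title_lower = title.lower()
--
--     # Main category
--     if any(word in title_lower for word in ['color', 'contrast', 'background']):
--         main_category = 'color_contrast'
--         sub_category = 'visual_design'
--     elif 'aria' in title_lower:
--         main_category = 'aria'
--         if 'role' in title_lower:
--             sub_category = 'roles'
--         elif 'label' in title_lower:
--             sub_category = 'labels'
--         else:
--             sub_category = 'general'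
--     elif any(word in title_lower for word in ['navigation', 'menu', 'landmark']):
--         main_category = 'navigation'
--         if 'landmark' in title_lower:
--             sub_category = 'landmarks'
--         elif 'menu' in title_lower:
--             sub_category = 'menus'
--         else:
--             sub_category = 'general'
--     elif any(word in title_lower for word in ['form', 'input', 'label', 'button']):
--         main_category = 'forms'
--         if 'label' in title_lower:
--             sub_category = 'labels'
--         elif 'input' in title_lower:
--             sub_category = 'inputs'
--         elif 'button' in title_lower:
--             sub_category = 'buttons'
--         else:
--             sub_category = 'general'
--     elif any(word in title_lower for word in ['image', 'img', 'alt']):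
--         main_category = 'images'
--         if 'alt' in title_lower:
--             sub_category = 'alt_text'
--         else:
--             sub_category = 'general'
--     elif any(word in title_lower for word in ['link', 'href']):
--         main_category = 'links'
--         if 'name' in title_lower:
--             sub_category = 'names'
--         elif 'text' in title_lower:
--             sub_category = 'text'
--         else:
--             sub_category = 'general'
--     elif any(word in title_lower for word in ['heading', 'h1', 'h2', 'h3']):
--         main_category = 'headings'
--         if 'order' in title_lower:
--             sub_category = 'hierarchy'
--         else:
--             sub_category = 'general'
--     elif any(word in title_lower for word in ['keyboard', 'focus', 'tab']):
--         main_category = 'keyboard'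
--         if 'focus' in title_lower:
--             sub_category = 'focus'
--         elif 'tab' in title_lower:
--             sub_category = 'tabbing'
--         else:
--             sub_category = 'general'
--     elif any(word in title_lower for word in ['language', 'lang']):
--         main_category = 'language'
--         sub_category = 'general'
--     else:
--         main_category = 'other'
--         sub_category = 'general'
--
--     return main_category, sub_category
-- ===== SOURCE B (Python) =====
-- # All keywords the classifier ever tests for (main + sub keywords).
-- KEYWORDS = (
--     'color', 'contrast', 'background', 'aria', 'role', 'label',
--     'navigation', 'menu', 'landmark', 'form', 'input', 'button',
--     'image', 'img', 'alt', 'link', 'href', 'name', 'text',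
--     'heading', 'h1', 'h2', 'h3', 'order', 'keyboard', 'focus',
--     'tab', 'language', 'lang',
-- )
--
-- # Priority-ordered rules: (main keywords, main category, sub rules, default sub).
-- RULES = [
--     (['color', 'contrast', 'background'], 'color_contrast', [], 'visual_design'),
--     (['aria'], 'aria', [('role', 'roles'), ('label', 'labels')], 'general'),
--     (['navigation', 'menu', 'landmark'], 'navigation',
--      [('landmark', 'landmarks'), ('menu', 'menus')], 'general'),
--     (['form', 'input', 'label', 'button'], 'forms',
--      [('label', 'labels'), ('input', 'inputs'), ('button', 'buttons')], 'general'),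
--     (['image', 'img', 'alt'], 'images', [('alt', 'alt_text')], 'general'),
--     (['link', 'href'], 'links', [('name', 'names'), ('text', 'text')], 'general'),
--     (['heading', 'h1', 'h2', 'h3'], 'headings', [('order', 'hierarchy')], 'general'),
--     (['keyboard', 'focus', 'tab'], 'keyboard',
--      [('focus', 'focus'), ('tab', 'tabbing')], 'general'),
--     (['language', 'lang'], 'language', [], 'general'),
-- ]
--
--
-- def categorize_issue(title):
--     """Categorize an issue based on its title and return detailed categorization."""
--     t = title.lower()
--     # One sweep over the title: at every offset record which keywords start there.
--     hits = set()
--     for i in range(len(t) + 1):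
--         tail = t[i:]
--         for kw in KEYWORDS:
--             if tail.startswith(kw):
--                 hits.add(kw)
--     # Pure table lookup on the hit set (no further text scanning).
--     for keywords, main_category, sub_rules, default_sub in RULES:
--         if any(kw in hits for kw in keywords):
--             for sub_keyword, sub_value in sub_rules:
--                 if sub_keyword in hits:
--                     return main_category, sub_value
--             return main_category, default_sub
--     return 'other', 'general'
-- ===== Notes on version B (the rewrite author's own statement) =====
-- stated objective: alternative
-- what changed: Instead of running a substring search per branch of an if/elif chain, B makes one position sweep over the lowered title collecting every keyword that starts at each offset into a hit set, then classifies by a pure table lookup on that set (no text is examined after the sweep).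
import Mathlib
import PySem

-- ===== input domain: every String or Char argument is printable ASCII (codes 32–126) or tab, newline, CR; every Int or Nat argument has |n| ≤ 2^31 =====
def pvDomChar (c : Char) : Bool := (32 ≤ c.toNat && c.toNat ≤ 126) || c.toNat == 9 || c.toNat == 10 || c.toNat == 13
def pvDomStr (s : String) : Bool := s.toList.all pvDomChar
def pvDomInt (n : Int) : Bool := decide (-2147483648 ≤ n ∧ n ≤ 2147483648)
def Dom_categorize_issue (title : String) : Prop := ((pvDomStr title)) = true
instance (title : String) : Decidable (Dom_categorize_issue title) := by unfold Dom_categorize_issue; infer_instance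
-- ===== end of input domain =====

-- B replaces A's per-branch substring searches by one position sweep over the title that
-- collects every occurring keyword into a hit set, then a pure table lookup on that set
-- (objective: alternative algorithm, same cost class).

-- ===== PORT A =====
def categorize_issue (title : String) : String × String :=
  let title_lower := PySem.Str.lower title
  if ["color", "contrast", "background"].any (fun word => PySem.Str.isIn word title_lower) then
    ("color_contrast", "visual_design")
  else if PySem.Str.isIn "aria" title_lower then
    ("aria",
      if PySem.Str.isIn "role" title_lower then "roles"
      else if PySem.Str.isIn "label" title_lower then "labels"
      else "general")
  else if ["navigation", "menu", "landmark"].any (fun word => PySem.Str.isIn word title_lower) then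
    ("navigation",
      if PySem.Str.isIn "landmark" title_lower then "landmarks"
      else if PySem.Str.isIn "menu" title_lower then "menus"
      else "general")
  else if ["form", "input", "label", "button"].any (fun word => PySem.Str.isIn word title_lower) then
    ("forms",
      if PySem.Str.isIn "label" title_lower then "labels"
      else if PySem.Str.isIn "input" title_lower then "inputs"
      else if PySem.Str.isIn "button" title_lower then "buttons"
      else "general")
  else if ["image", "img", "alt"].any (fun word => PySem.Str.isIn word title_lower) then
    ("images",
      if PySem.Str.isIn "alt" title_lower then "alt_text"
      else "general")
  else if ["link", "href"].any (fun word => PySem.Str.isIn word title_lower) then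
    ("links",
      if PySem.Str.isIn "name" title_lower then "names"
      else if PySem.Str.isIn "text" title_lower then "text"
      else "general")
  else if ["heading", "h1", "h2", "h3"].any (fun word => PySem.Str.isIn word title_lower) then
    ("headings",
      if PySem.Str.isIn "order" title_lower then "hierarchy"
      else "general")
  else if ["keyboard", "focus", "tab"].any (fun word => PySem.Str.isIn word title_lower) then
    ("keyboard",
      if PySem.Str.isIn "focus" title_lower then "focus"
      else if PySem.Str.isIn "tab" title_lower then "tabbing"
      else "general")
  else if ["language", "lang"].any (fun word => PySem.Str.isIn word title_lower) then
    ("language", "general")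
  else
    ("other", "general")

-- ===== PORT B =====
-- Source B's KEYWORDS: every keyword the classifier ever tests for
def pvKeywords : List String :=
  ["color", "contrast", "background", "aria", "role", "label",
   "navigation", "menu", "landmark", "form", "input", "button",
   "image", "img", "alt", "link", "href", "name", "text",
   "heading", "h1", "h2", "h3", "order", "keyboard", "focus",
   "tab", "language", "lang"]

-- Source B's RULES table: (main keywords, main category, sub rules, default sub)
def pvRules : List (List String × String × List (String × String) × String) :=
  [ (["color", "contrast", "background"], "color_contrast", [], "visual_design"),
    (["aria"], "aria", [("role", "roles"), ("label", "labels")], "general"),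
    (["navigation", "menu", "landmark"], "navigation",
      [("landmark", "landmarks"), ("menu", "menus")], "general"),
    (["form", "input", "label", "button"], "forms",
      [("label", "labels"), ("input", "inputs"), ("button", "buttons")], "general"),
    (["image", "img", "alt"], "images", [("alt", "alt_text")], "general"),
    (["link", "href"], "links", [("name", "names"), ("text", "text")], "general"),
    (["heading", "h1", "h2", "h3"], "headings", [("order", "hierarchy")], "general"),
    (["keyboard", "focus", "tab"], "keyboard",
      [("focus", "focus"), ("tab", "tabbing")], "general"),
    (["language", "lang"], "language", [], "general") ]

-- the sweep: for i in range(len(t)+1): for kw in KEYWORDS: if t[i:].startswith(kw): hits.add(kw)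
-- (t[i:] for 0 ≤ i is exactly List.drop i on the char list)
def pvHits (cs : List Char) : PySem.Set String :=
  (List.range (cs.length + 1)).foldl
    (fun acc i =>
      pvKeywords.foldl
        (fun acc kw =>
          if PySem.Chars.startswith (cs.drop i) kw.toList then PySem.Set.add acc kw else acc)
        acc)
    PySem.Set.empty

-- Source B's inner loop over a rule's sub_rules: first sub keyword in the hit set, else the default
def pvFirstSub (hits : PySem.Set String) : List (String × String) → String → String
  | [], dflt => dflt
  | (k, v) :: rest, dflt =>
      if PySem.Set.contains hits k then v else pvFirstSub hits rest dflt

-- Source B's loop over RULES: first rule one of whose keywords is in the hit set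
def pvScanRules (hits : PySem.Set String) :
    List (List String × String × List (String × String) × String) → String × String
  | [] => ("other", "general")
  | (kws, main, subs, dflt) :: rest =>
      if kws.any (fun kw => PySem.Set.contains hits kw) then
        (main, pvFirstSub hits subs dflt)
      else
        pvScanRules hits rest

def categorize_issue_alt (title : String) : String × String :=
  pvScanRules (pvHits (PySem.Str.lower title).toList) pvRules

-- ===== PRECONDITION & SPEC =====
def Spec_categorize_issue (title : String) (out : String × String) : Prop := out = categorize_issue_alt title
instance (title : String) (out : String × String) : Decidable (Spec_categorize_issue title out) := by unfold Spec_categorize_issue; infer_instance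

-- ===== CLAIM =====
def Claim_equal_categorize_issue : Prop := ∀ (title : String), Dom_categorize_issue title → Spec_categorize_issue title (categorize_issue title)

-- ===== LEMMAS AND PROOFS =====

-- membership after the inner fold over the keyword list
theorem mem_inner_fold (p : String → Bool) (l : List String) (s : PySem.Set String) (y : String) :
    y ∈ l.foldl (fun acc kw => if p kw then PySem.Set.add acc kw else acc) s ↔
      y ∈ s ∨ (y ∈ l ∧ p y = true) := by
  induction l generalizing s with
  | nil => simp
  | cons x xs ih =>
      simp only [List.foldl_cons, List.mem_cons]
      by_cases hx : p x = true
      · rw [if_pos hx, ih, PySem.Set.mem_add]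
        constructor
        · rintro ((h | rfl) | ⟨h, hp⟩)
          · exact Or.inl h
          · exact Or.inr ⟨Or.inl rfl, hx⟩
          · exact Or.inr ⟨Or.inr h, hp⟩
        · rintro (h | ⟨(rfl | h), hp⟩)
          · exact Or.inl (Or.inl h)
          · exact Or.inl (Or.inr rfl)
          · exact Or.inr ⟨h, hp⟩
      · rw [if_neg hx, ih]
        constructor
        · rintro (h | ⟨h, hp⟩)
          · exact Or.inl h
          · exact Or.inr ⟨Or.inr h, hp⟩
        · rintro (h | ⟨(rfl | h), hp⟩)
          · exact Or.inl h
          · exact absurd hp hx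
          · exact Or.inr ⟨h, hp⟩

-- membership after the outer fold over the position list
theorem mem_outer_fold (cs : List Char) (js : List Nat) (s : PySem.Set String) (y : String) :
    y ∈ js.foldl
        (fun acc i =>
          pvKeywords.foldl
            (fun acc kw =>
              if PySem.Chars.startswith (cs.drop i) kw.toList then PySem.Set.add acc kw else acc)
            acc)
        s ↔
      y ∈ s ∨ ∃ i ∈ js, y ∈ pvKeywords ∧ PySem.Chars.startswith (cs.drop i) y.toList = true := by
  induction js generalizing s with
  | nil => simp
  | cons j js ih =>
      simp only [List.foldl_cons, ih, mem_inner_fold, List.mem_cons]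
      constructor
      · rintro ((h | ⟨hk, hp⟩) | ⟨i, hi, hk, hp⟩)
        · exact Or.inl h
        · exact Or.inr ⟨j, Or.inl rfl, hk, hp⟩
        · exact Or.inr ⟨i, Or.inr hi, hk, hp⟩
      · rintro (h | ⟨i, (rfl | hi), hk, hp⟩)
        · exact Or.inl (Or.inl h)
        · exact Or.inl (Or.inr ⟨hk, hp⟩)
        · exact Or.inr ⟨i, hi, hk, hp⟩

-- the bridge: for a keyword of the table, membership in the hit set IS 'kw in t'
theorem contains_pvHits (cs : List Char) (kw : String)
    (hmem : kw ∈ pvKeywords) :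
    PySem.Set.contains (pvHits cs) kw = PySem.Chars.isIn kw.toList cs := by
  rcases h : PySem.Chars.isIn kw.toList cs with _ | _
  · rw [PySem.Chars.isIn_eq_false_iff] at h
    simp only [PySem.Set.contains_eq_listContains, List.contains_eq_mem, decide_eq_false_iff_not]
    intro hc
    rw [pvHits, mem_outer_fold] at hc
    rcases hc with hc | ⟨i, _, _, hp⟩
    · simp [PySem.Set.empty] at hc
    · exact h (((PySem.Chars.startswith_iff _ _).1 hp).isInfix.trans (cs.drop_suffix i).isInfix)
  · have hinf := (PySem.Chars.isIn_iff_infix kw.toList cs).1 h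
    simp only [PySem.Set.contains_eq_listContains, List.contains_eq_mem, decide_eq_true_eq]
    rw [pvHits, mem_outer_fold]
    rcases hinf with ⟨a, b, hab⟩
    refine Or.inr ⟨a.length, ?_, hmem, ?_⟩
    · have hlen : a.length ≤ cs.length := by rw [← hab]; simp
      exact List.mem_range.2 (by omega)
    · rw [PySem.Chars.startswith_iff, ← hab, List.append_assoc, List.drop_left]
      exact ⟨b, rfl⟩

-- ===== VERDICT =====
theorem categorize_issue_spec : Claim_equal_categorize_issue := by
  intro title _
  show categorize_issue title = categorize_issue_alt title
  have H : ∀ kw ∈ pvKeywords,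
      PySem.Set.contains (pvHits (PySem.Str.lower title).toList) kw =
        PySem.Str.isIn kw (PySem.Str.lower title) := by
    intro kw hk
    rw [contains_pvHits _ kw hk]
    simp [PySem.Str.isIn]
  simp only [categorize_issue, categorize_issue_alt, pvScanRules, pvRules, pvFirstSub,
    List.any_cons, List.any_nil, Bool.or_false,
    H "color" (by decide), H "contrast" (by decide), H "background" (by decide),
    H "aria" (by decide), H "role" (by decide), H "label" (by decide),
    H "navigation" (by decide), H "menu" (by decide), H "landmark" (by decide),
    H "form" (by decide), H "input" (by decide), H "button" (by decide),
    H "image" (by decide), H "img" (by decide), H "alt" (by decide),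
    H "link" (by decide), H "href" (by decide), H "name" (by decide), H "text" (by decide),
    H "heading" (by decide), H "h1" (by decide), H "h2" (by decide), H "h3" (by decide),
    H "order" (by decide), H "keyboard" (by decide), H "focus" (by decide),
    H "tab" (by decide), H "language" (by decide), H "lang" (by decide)]
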